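-- pv_equiv track=rewrite | github.com/YoukaiYoru/python-seminario-uni | 23-2-PC1-2.py | eliminar_menor
-- ===== SOURCE A (Python) =====
-- def menor_digito(numero):
--    min_digito = 9
--    while numero > 0:
--       digito = numero % 10
--       if digito < min_digito:
--             min_digito = digito
--       numero //= 10
--    return min_digito
--
-- def eliminar_menor(numero):
--    if numero < 10:
--    # Si el número tiene un solo dígito, no hay nada que eliminar
--       return 0
--
--    # Inicializar variables
--    nuevo_numero = 0
--    multiplicador = 1
--    copia_numero = numero
--
--    min_digito = menor_digito(numero)
--    # Construir un nuevo número sin el menor dígito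
--    numero = copia_numero  # Restaurar el valor original del número
--    while numero > 0:
--       digito = numero % 10
--       if digito != min_digito:
--          nuevo_numero += digito * multiplicador
--          multiplicador *= 10
--       numero //= 10
--
--    return nuevo_numero
-- ===== SOURCE B (Python) =====
-- def eliminar_menor(numero):
--     if numero < 10:
--         return 0
--     s = str(numero)
--     m = min(s)
--     resultado = 0
--     for ch in s:
--         if ch != m:
--             resultado = resultado * 10 + (ord(ch) - ord('0'))
--     return resultado
-- ===== Notes on version B (the rewrite author's own statement) =====
-- stated objective: idiomatic
-- what changed: Replaces A's two arithmetic digit-extraction loops (modulo/floor-division with a multiplier accumulator, least-significant first) by the string approach: str(numero), min() over its characters, and one forward Horner pass that rebuilds the number skipping the minimal digit character.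
import Mathlib
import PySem

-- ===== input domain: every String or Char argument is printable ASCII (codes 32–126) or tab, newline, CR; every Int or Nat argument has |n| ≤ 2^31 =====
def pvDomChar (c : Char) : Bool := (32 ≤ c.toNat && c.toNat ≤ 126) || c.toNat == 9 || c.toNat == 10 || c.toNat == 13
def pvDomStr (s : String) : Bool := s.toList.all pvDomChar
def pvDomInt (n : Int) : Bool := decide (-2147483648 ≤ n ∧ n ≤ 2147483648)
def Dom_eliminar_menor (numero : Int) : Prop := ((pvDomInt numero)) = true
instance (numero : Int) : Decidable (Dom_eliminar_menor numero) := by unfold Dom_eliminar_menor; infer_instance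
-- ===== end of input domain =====

-- B rebuilds the number from str(numero) with min() and one Horner pass instead of A's two
-- modulo/floor-division loops with a multiplier accumulator; same result, similar cost (idiomatic).

-- termination helper for the ports' while-loops (numero //= 10 shrinks a positive numero)
theorem pv_floordiv10_toNat_lt (n : Int) (h : 0 < n) :
    (PySem.Int.floordiv n 10).toNat < n.toNat := by
  rw [PySem.Int.floordiv_eq_ediv_of_pos (by norm_num)]; omega

-- ===== PORT A =====
-- while numero > 0: digito = numero % 10; if digito < min_digito: min_digito = digito; numero //= 10
def menorLoopA (numero min_digito : Int) : Int :=
  if h : 0 < numero then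
    let digito := PySem.Int.mod numero 10
    menorLoopA (PySem.Int.floordiv numero 10)
      (if digito < min_digito then digito else min_digito)
  else min_digito
termination_by numero.toNat
decreasing_by exact pv_floordiv10_toNat_lt numero h

def menor_digito (numero : Int) : Int := menorLoopA numero 9

-- while numero > 0: digito = numero % 10; if digito != min_digito: nuevo += digito*mult; mult *= 10; numero //= 10
def buildLoopA (numero nuevo_numero multiplicador min_digito : Int) : Int :=
  if h : 0 < numero then
    let digito := PySem.Int.mod numero 10
    if digito ≠ min_digito then
      buildLoopA (PySem.Int.floordiv numero 10) (nuevo_numero + digito * multiplicador)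
        (multiplicador * 10) min_digito
    else
      buildLoopA (PySem.Int.floordiv numero 10) nuevo_numero multiplicador min_digito
  else nuevo_numero
termination_by numero.toNat
decreasing_by all_goals exact pv_floordiv10_toNat_lt numero h

def eliminar_menor (numero : Int) : Int :=
  if numero < 10 then 0
  else
    let copia_numero := numero
    let min_digito := menor_digito numero
    buildLoopA copia_numero 0 1 min_digito

-- ===== PORT B =====
-- s = str(numero); m = min(s); resultado = Horner pass over s skipping m
def eliminar_menor_alt (numero : Int) : Int :=
  if numero < 10 then 0
  else
    let s := PySem.Int.toChars numero
    match PySem.List.min? s (fun c => c) with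
    | none => 0  -- unreachable: s is nonempty (numero ≥ 10)
    | some m =>
        s.foldl (fun resultado ch =>
          if ch ≠ m then resultado * 10 + ((ch.toNat : Int) - 48) else resultado) 0

-- ===== PRECONDITION & SPEC =====
def Spec_eliminar_menor (numero : Int) (out : Int) : Prop := out = eliminar_menor_alt numero
instance (numero : Int) (out : Int) : Decidable (Spec_eliminar_menor numero out) := by unfold Spec_eliminar_menor; infer_instance

-- ===== CLAIM (what is proved, stated in full; the proofs are below) =====
def Claim_equal_eliminar_menor : Prop := ∀ (numero : Int), Dom_eliminar_menor numero → Spec_eliminar_menor numero (eliminar_menor numero)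

-- ===== LEMMAS AND PROOFS =====

-- A's first loop computes a running min over the little-endian digits
theorem menorLoopA_eq (N : ℕ) : ∀ (a : ℕ),
    menorLoopA (N : Int) (a : Int) = ((Nat.digits 10 N).foldl min a : ℕ) := by
  induction N using Nat.strong_induction_on with
  | _ N ih =>
    intro a
    rw [menorLoopA]
    by_cases h0 : N = 0
    · subst h0; simp
    · have hN : 0 < N := Nat.pos_of_ne_zero h0
      have hpos : (0 : Int) < (N : Int) := by exact_mod_cast hN
      rw [dif_pos hpos]
      have hmod : PySem.Int.mod (N : Int) 10 = ((N % 10 : ℕ) : Int) := by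
        exact_mod_cast PySem.Int.mod_natCast N 10
      have hdiv : PySem.Int.floordiv (N : Int) 10 = ((N / 10 : ℕ) : Int) := by
        exact_mod_cast PySem.Int.floordiv_natCast N 10
      have hlt : N / 10 < N := Nat.div_lt_self hN (by norm_num)
      rw [Nat.digits_def' (by norm_num : 1 < 10) hN]
      simp only [hmod, hdiv, List.foldl_cons]
      have hbr : (if ((N % 10 : ℕ) : Int) < (a : Int) then ((N % 10 : ℕ) : Int) else (a : Int))
          = ((min a (N % 10) : ℕ) : Int) := by
        split_ifs with hc
        · have : N % 10 < a := by exact_mod_cast hc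
          simp [Nat.min_def]; omega
        · have : ¬ N % 10 < a := by exact_mod_cast hc
          simp [Nat.min_def]; omega
      rw [hbr, ih (N / 10) hlt (min a (N % 10))]

-- A's second loop is ofDigits of the little-endian digits with the minimal one filtered out
theorem buildLoopA_eq (N : ℕ) : ∀ (nuevo mult m : Int),
    buildLoopA (N : Int) nuevo mult m
      = nuevo + mult * (Nat.ofDigits 10 ((Nat.digits 10 N).filter (fun d => (d : Int) ≠ m)) : ℕ) := by
  induction N using Nat.strong_induction_on with
  | _ N ih =>
    intro nuevo mult m
    rw [buildLoopA]
    by_cases h0 : N = 0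
    · subst h0; simp
    · have hN : 0 < N := Nat.pos_of_ne_zero h0
      have hpos : (0 : Int) < (N : Int) := by exact_mod_cast hN
      rw [dif_pos hpos]
      have hmod : PySem.Int.mod (N : Int) 10 = ((N % 10 : ℕ) : Int) := by
        exact_mod_cast PySem.Int.mod_natCast N 10
      have hdiv : PySem.Int.floordiv (N : Int) 10 = ((N / 10 : ℕ) : Int) := by
        exact_mod_cast PySem.Int.floordiv_natCast N 10
      have hlt : N / 10 < N := Nat.div_lt_self hN (by norm_num)
      rw [Nat.digits_def' (by norm_num : 1 < 10) hN]
      simp only [hmod, hdiv]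
      by_cases hk : ((N % 10 : ℕ) : Int) ≠ m
      · rw [if_pos hk, ih (N / 10) hlt, List.filter_cons_of_pos (by simpa using hk),
          Nat.ofDigits_cons]
        push_cast; ring
      · rw [if_neg hk, ih (N / 10) hlt, List.filter_cons_of_neg (by simpa using hk)]

-- Nat.toDigits (the string str(n) is built from) is the reversed digitChar image of Nat.digits
theorem toDigitsCore_eq (N : ℕ) : ∀ (fuel : ℕ) (acc : List Char), 0 < N → N < fuel →
    Nat.toDigitsCore 10 fuel N acc = ((Nat.digits 10 N).map Nat.digitChar).reverse ++ acc := by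
  induction N using Nat.strong_induction_on with
  | _ N ih =>
    intro fuel acc hN hf
    match fuel with
    | 0 => omega
    | f + 1 =>
      rw [Nat.digits_def' (by norm_num : 1 < 10) hN]
      by_cases hq : N / 10 = 0
      · simp [Nat.toDigitsCore, hq]
      · have hq' : 0 < N / 10 := Nat.pos_of_ne_zero hq
        have h1 : N / 10 < N := Nat.div_lt_self hN (by norm_num)
        have h2 : N / 10 < f := by omega
        simp only [Nat.toDigitsCore, if_neg hq]
        rw [ih (N / 10) h1 f (Nat.digitChar (N % 10) :: acc) hq' h2,
          Nat.digits_def' (by norm_num : 1 < 10) hq']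
        simp

theorem toDigits_eq (N : ℕ) (hN : 0 < N) :
    Nat.toDigits 10 N = ((Nat.digits 10 N).map Nat.digitChar).reverse :=
  by simpa using toDigitsCore_eq N (N + 1) [] hN (by omega)

-- digitChar is an order embedding on digits < 10
theorem digitChar_toNat (d : ℕ) (hd : d < 10) : (Nat.digitChar d).toNat = 48 + d := by
  interval_cases d <;> decide

theorem digitChar_lt_iff (c d : ℕ) (hc : c < 10) (hd : d < 10) :
    (Nat.digitChar c < Nat.digitChar d) ↔ c < d := by
  interval_cases c <;> interval_cases d <;> decide

theorem digitChar_eq_iff (c d : ℕ) (hc : c < 10) (hd : d < 10) :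
    (Nat.digitChar c = Nat.digitChar d) ↔ c = d := by
  interval_cases c <;> interval_cases d <;> decide

-- the min? fold over digit characters tracks the numeric running min
-- (f abstracts min?'s fold step; only its behaviour on `some` accumulators matters)
theorem minFold_digitChar (f : Option Char → Char → Option Char)
    (hf : ∀ (m x : Char), f (some m) x = if x < m then some x else some m)
    (ds : List ℕ) (h : ∀ d ∈ ds, d < 10) : ∀ (a : ℕ), a < 10 →
    ((ds.map Nat.digitChar).foldl f (some (Nat.digitChar a)))
      = some (Nat.digitChar (ds.foldl min a)) := by
  induction ds with
  | nil => intro a _; rfl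
  | cons d t iht =>
    intro a ha
    have hd : d < 10 := h d (by simp)
    have ht : ∀ x ∈ t, x < 10 := fun x hx => h x (by simp [hx])
    simp only [List.map_cons, List.foldl_cons, hf]
    have hbr : (if Nat.digitChar d < Nat.digitChar a then some (Nat.digitChar d)
        else some (Nat.digitChar a)) = some (Nat.digitChar (min a d)) := by
      by_cases hc : d < a
      · rw [if_pos ((digitChar_lt_iff d a hd ha).mpr hc)]
        have hmin : min a d = d := by omega
        rw [hmin]
      · rw [if_neg (fun hlt' => hc ((digitChar_lt_iff d a hd ha).mp hlt'))]
        have hmin : min a d = a := by omega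
        rw [hmin]
    rw [hbr, iht ht (min a d) (by omega)]

-- running min over a ℕ-list does not depend on traversal direction
theorem foldl_min_reverse (l : List ℕ) (a : ℕ) : l.reverse.foldl min a = l.foldl min a := by
  rw [List.foldl_reverse, List.foldl_eq_foldr]
  induction l generalizing a with
  | nil => rfl
  | cons d t ih => simp only [List.foldr_cons, ← ih, min_comm]

theorem foldl_min_le (l : List ℕ) (a : ℕ) : l.foldl min a ≤ a := by
  induction l generalizing a with
  | nil => simp
  | cons d t ih => exact le_trans (by simpa using ih (min a d)) (min_le_left a d)

-- B's Horner pass over the reversed digitChar list computes ofDigits of the kept digits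
theorem hornerFold_eq (m : ℕ) (hm : m < 10) (ds : List ℕ) : (∀ d ∈ ds, d < 10) → ∀ (a : Int),
    ((ds.map Nat.digitChar).reverse).foldl
      (fun resultado ch => if ch ≠ Nat.digitChar m then resultado * 10 + ((ch.toNat : Int) - 48)
        else resultado) a
      = a * 10 ^ (ds.filter (fun d => d ≠ m)).length
        + (Nat.ofDigits 10 (ds.filter (fun d => d ≠ m)) : ℕ) := by
  induction ds using List.reverseRecOn with
  | nil => intro _ a; simp
  | append_singleton t d ih =>
    intro h a
    have hd : d < 10 := h d (by simp)
    have ht : ∀ x ∈ t, x < 10 := fun x hx => h x (by simp [hx])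
    rw [List.map_append, List.reverse_append]
    simp only [List.map_cons, List.map_nil, List.reverse_cons, List.reverse_nil,
      List.nil_append, List.cons_append, List.foldl_cons]
    by_cases hk : d ≠ m
    · have hck : Nat.digitChar d ≠ Nat.digitChar m := by
        intro hc; exact hk ((digitChar_eq_iff d m hd hm).mp hc)
      rw [if_pos hck, ih ht, List.filter_append]
      simp only [List.filter_cons, decide_eq_true_eq, if_pos hk, List.filter_nil]
      rw [Nat.ofDigits_append, digitChar_toNat d hd]
      push_cast [Nat.ofDigits_cons, Nat.ofDigits_nil]
      simp only [List.length_append, List.length_cons, List.length_nil, pow_succ]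
      ring
    · have hck : ¬ Nat.digitChar d ≠ Nat.digitChar m := by
        simp only [ne_eq, not_not] at hk ⊢; exact hk ▸ rfl
      rw [if_neg hck, ih ht, List.filter_append]
      simp only [List.filter_cons, decide_eq_true_eq, if_neg hk, List.filter_nil,
        List.append_nil]

-- main equivalence on the nontrivial branch (numero ≥ 10)
theorem main_eq (numero : Int) (h10 : ¬ numero < 10) :
    eliminar_menor numero = eliminar_menor_alt numero := by
  set N := numero.toNat with hNdef
  have hn : numero = (N : Int) := by omega
  have hN : 0 < N := by omega
  set ds := Nat.digits 10 N with hds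
  have hlt : ∀ d ∈ ds, d < 10 := fun d hd => Nat.digits_lt_base (by norm_num) hd
  set md := ds.foldl min 9 with hmd
  have hmd10 : md < 10 := lt_of_le_of_lt (foldl_min_le ds 9) (by norm_num)
  -- A side
  have hA : eliminar_menor numero
      = (Nat.ofDigits 10 (ds.filter (fun d => d ≠ md)) : ℕ) := by
    rw [eliminar_menor, if_neg h10, hn]
    show buildLoopA (N : Int) 0 1 (menorLoopA (N : Int) 9) = _
    have h9 : (9 : Int) = ((9 : ℕ) : Int) := by norm_num
    rw [h9, menorLoopA_eq N 9, buildLoopA_eq N 0 1 ((md : ℕ) : Int)]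
    rw [show List.filter (fun (d : ℕ) => decide ((d : Int) ≠ ((md : ℕ) : Int))) ds
        = ds.filter (fun d => d ≠ md) from List.filter_congr (fun d _ => by simp)]
    ring
  -- B side
  have hB : eliminar_menor_alt numero
      = (Nat.ofDigits 10 (ds.filter (fun d => d ≠ md)) : ℕ) := by
    have hchars : PySem.Int.toChars (N : Int) = ((ds.map Nat.digitChar).reverse) := by
      rw [PySem.Int.toChars, if_neg (by omega)]
      simp only [Int.toNat_natCast]
      exact toDigits_eq N hN
    have hne : ds.reverse ≠ [] := by
      simp [hds, Nat.digits_ne_nil_iff_ne_zero]; omega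
    obtain ⟨d₀, t, hrev⟩ := List.exists_cons_of_ne_nil hne
    have hd₀ : d₀ < 10 := hlt d₀ (by rw [← List.mem_reverse, hrev]; simp)
    have hmin : PySem.List.min? (PySem.Int.toChars (N : Int)) (fun c => c)
        = some (Nat.digitChar md) := by
      rw [hchars, ← List.map_reverse, PySem.List.min?, hrev]
      simp only [List.map_cons, List.foldl_cons]
      rw [minFold_digitChar _ (fun m x => rfl) t
        (fun x hx => hlt x (by rw [← List.mem_reverse, hrev]; simp [hx])) d₀ hd₀]
      congr 2
      have h1 : ds.reverse.foldl min 9 = md := by rw [foldl_min_reverse]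
      rw [← h1, hrev]
      simp [List.foldl_cons, Nat.le_of_lt_succ hd₀]
    rw [eliminar_menor_alt, if_neg h10, hn]
    show (match PySem.List.min? (PySem.Int.toChars (N : Int)) (fun c => c) with
      | none => 0
      | some m => (PySem.Int.toChars (N : Int)).foldl
          (fun resultado ch => if ch ≠ m then resultado * 10 + ((ch.toNat : Int) - 48)
            else resultado) 0) = _
    rw [hmin, hchars]
    show ((ds.map Nat.digitChar).reverse).foldl
        (fun resultado ch => if ch ≠ Nat.digitChar md then resultado * 10 + ((ch.toNat : Int) - 48)
          else resultado) 0 = _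
    rw [hornerFold_eq md hmd10 ds hlt 0]
    simp
  rw [hA, hB]

-- ===== VERDICT (by name: the statement is the Claim_ definition above) =====
theorem eliminar_menor_spec : Claim_equal_eliminar_menor := by
  intro numero _
  unfold Spec_eliminar_menor
  by_cases h10 : numero < 10
  · rw [eliminar_menor, eliminar_menor_alt, if_pos h10, if_pos h10]
  · exact main_eq numero h10
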